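-- pv_equiv track=rewrite | github.com/benquick123/code-profiling | code/batch-2/vse-naloge-brez-testov/DN5-M-075.py | izloci_besedo
-- ===== SOURCE A (Python) =====
-- def izloci_besedo(beseda):
--     a = ""
--     i = 0
--     for b in beseda:
--         if b.isalnum() == False:
--             i += 1
--         else:
--             a = beseda[i:]
--             break
--     i = 0
--     for b in a[::-1]:
--         if b.isalnum() == False:
--             i += 1
--         else:
--             if i == 0:
--                 break
--             else:
--                 a = a[:-i]
--                 break
--     return a
-- ===== SOURCE B (Python) =====
-- def izloci_besedo(beseda):
--     idxs = [i for i, b in enumerate(beseda) if b.isalnum()]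
--     if not idxs:
--         return ""
--     return beseda[idxs[0]:idxs[-1] + 1]
-- ===== Notes on version B (the rewrite author's own statement) =====
-- stated objective: simpler
-- what changed: B collects the indices of all alphanumeric characters in one forward pass and returns a single slice between the first and last such index, instead of A's two directional scans that rebuild an intermediate string.
import Mathlib
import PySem

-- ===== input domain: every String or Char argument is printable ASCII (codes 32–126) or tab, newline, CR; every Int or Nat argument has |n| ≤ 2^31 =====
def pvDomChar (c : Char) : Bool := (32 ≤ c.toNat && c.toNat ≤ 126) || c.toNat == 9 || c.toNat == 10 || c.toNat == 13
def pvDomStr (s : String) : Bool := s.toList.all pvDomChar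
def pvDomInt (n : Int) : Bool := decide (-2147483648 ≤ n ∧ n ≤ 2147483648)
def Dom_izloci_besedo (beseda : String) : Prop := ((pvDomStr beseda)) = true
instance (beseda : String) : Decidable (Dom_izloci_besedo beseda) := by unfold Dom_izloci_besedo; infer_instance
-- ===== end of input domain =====

-- B strips leading/trailing non-alphanumeric characters by collecting the alphanumeric indices in
-- one pass and taking a single slice, instead of A's two directional break-scans; objective: simpler.

-- ===== PORT A =====
-- first for-loop: count leading non-alnum chars in i; at the first alnum char set a = beseda[i:] and break
def pvScanFront (orig : List Char) : List Char → Int → List Char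
  | [], _ => []
  | b :: rest, i =>
    if PySem.Chars.isalnum b = false then pvScanFront orig rest (i + 1)
    else PySem.List.slice orig (some i) none

-- second for-loop over a[::-1]: count trailing non-alnum chars in i; at the first alnum char break,
-- cutting with a[:-i] when i ≠ 0
def pvScanBack (a : List Char) : List Char → Int → List Char
  | [], _ => a
  | b :: rest, i =>
    if PySem.Chars.isalnum b = false then pvScanBack a rest (i + 1)
    else if i == 0 then a else PySem.List.slice a none (some (-i))

def izloci_besedo (beseda : String) : String :=
  let a := pvScanFront beseda.toList beseda.toList 0
  -- the loop iterates over a[::-1], which is a.reverse (PySem.List.slice?_none_none_neg_one)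
  String.ofList (pvScanBack a a.reverse 0)

-- ===== PORT B =====
def izloci_besedo_alt (beseda : String) : String :=
  let cs := beseda.toList
  -- idxs = [i for i, b in enumerate(beseda) if b.isalnum()]
  let idxs := (PySem.List.enumerate cs).filterMap
      (fun ib => if PySem.Chars.isalnum ib.2 then some ib.1 else none)
  if idxs = [] then ""
  else String.ofList (PySem.List.slice cs (some (PySem.List.pyGetD idxs 0 0))
      (some (PySem.List.pyGetD idxs (-1) 0 + 1)))

-- ===== PRECONDITION & SPEC =====
def Spec_izloci_besedo (beseda : String) (out : String) : Prop := out = izloci_besedo_alt beseda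
instance (beseda : String) (out : String) : Decidable (Spec_izloci_besedo beseda out) := by unfold Spec_izloci_besedo; infer_instance

-- ===== CLAIM (what is proved, stated in full; the proofs are below) =====
def Claim_equal_izloci_besedo : Prop := ∀ (beseda : String), Dom_izloci_besedo beseda → Spec_izloci_besedo beseda (izloci_besedo beseda)

-- ===== LEMMAS AND PROOFS =====

-- the predicate both scans branch on: "not alphanumeric"
def pvQ (c : Char) : Bool := !PySem.Chars.isalnum c

-- B's index list, with an arbitrary enumeration start
def pvIdxs (s : Int) (cs : List Char) : List Int :=
  (PySem.List.enumerate cs s).filterMap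
    (fun ib => if PySem.Chars.isalnum ib.2 then some ib.1 else none)

-- A's first loop is dropWhile of the not-yet-visited suffix
theorem pvScanFront_eq (orig : List Char) :
    ∀ (rest : List Char) (n : Nat), orig.drop n = rest →
      pvScanFront orig rest (n : Int) = rest.dropWhile pvQ := by
  intro rest
  induction rest with
  | nil => intro n _; simp [pvScanFront]
  | cons b r ih =>
    intro n hd
    cases hb : PySem.Chars.isalnum b with
    | false =>
      have h1 : orig.drop (n + 1) = r := by
        have h2 := congrArg (List.drop 1) hd
        rw [List.drop_drop] at h2
        simpa [Nat.add_comm] using h2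
      have hstep : pvScanFront orig (b :: r) (n : Int) = pvScanFront orig r ((n : Int) + 1) := by
        simp [pvScanFront, hb]
      rw [hstep]
      have hc : ((n : Int) + 1) = ((n + 1 : Nat) : Int) := by push_cast; ring
      rw [hc, ih (n + 1) h1]
      simp [pvQ, hb]
    | true =>
      have hstep : pvScanFront orig (b :: r) (n : Int) = PySem.List.slice orig (some (n : Int)) none := by
        simp [pvScanFront, hb]
      rw [hstep, PySem.List.slice_from_natCast, hd]
      simp [pvQ, hb]

-- A's second loop: either everything left is non-alnum (a survives) or the counted tail is cut
theorem pvScanBack_eq (a : List Char) :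
    ∀ (rest : List Char) (n : Nat), a.reverse.drop n = rest →
      pvScanBack a rest (n : Int) =
        if ∀ x ∈ rest, pvQ x = true then a
        else a.take (a.length - (n + (rest.takeWhile pvQ).length)) := by
  intro rest
  induction rest with
  | nil => intro n _; simp [pvScanBack]
  | cons b r ih =>
    intro n hd
    cases hb : PySem.Chars.isalnum b with
    | false =>
      have h1 : a.reverse.drop (n + 1) = r := by
        have h2 := congrArg (List.drop 1) hd
        rw [List.drop_drop] at h2
        simpa [Nat.add_comm] using h2
      have hstep : pvScanBack a (b :: r) (n : Int) = pvScanBack a r ((n : Int) + 1) := by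
        simp [pvScanBack, hb]
      rw [hstep]
      have hc : ((n : Int) + 1) = ((n + 1 : Nat) : Int) := by push_cast; ring
      rw [hc, ih (n + 1) h1]
      have hq : pvQ b = true := by simp [pvQ, hb]
      by_cases hall : ∀ x ∈ r, pvQ x = true
      · have hball : ∀ x ∈ b :: r, pvQ x = true := by
          intro x hx
          rcases List.mem_cons.mp hx with rfl | hx
          · exact hq
          · exact hall x hx
        rw [if_pos hall, if_pos hball]
      · have hall' : ¬ ∀ x ∈ b :: r, pvQ x = true := by
          intro h; exact hall (fun x hx => h x (List.mem_cons_of_mem _ hx))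
        rw [if_neg hall, if_neg hall']
        rw [List.takeWhile_cons_of_pos hq]
        congr 1
        simp
        omega
    | true =>
      have hq : pvQ b = false := by simp [pvQ, hb]
      have hall' : ¬ ∀ x ∈ b :: r, pvQ x = true := by
        intro h
        have := h b (List.mem_cons_self)
        rw [hq] at this; exact Bool.false_ne_true this
      rw [if_neg hall', List.takeWhile_cons_of_neg (by simp [hq])]
      have hlen : n ≤ a.length := by
        by_contra h
        rw [List.drop_eq_nil_of_le (by simp; omega)] at hd
        exact List.cons_ne_nil _ _ hd.symm
      by_cases hn : n = 0
      · subst hn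
        have hstep : pvScanBack a (b :: r) ((0 : Nat) : Int) = a := by
          simp [pvScanBack, hb]
        rw [hstep]
        simp
      · have hpos : 0 < n := Nat.pos_of_ne_zero hn
        have hne : ((n : Int) == 0) = false := by
          simp [hn]
        have hstep : pvScanBack a (b :: r) (n : Int) = PySem.List.slice a none (some (-(n : Int))) := by
          simp [pvScanBack, hb, hne]
        rw [hstep, PySem.List.slice_to_neg_natCast a n hpos]
        simp

theorem pvIdxs_append (s : Int) (xs ys : List Char) :
    pvIdxs s (xs ++ ys) = pvIdxs s xs ++ pvIdxs (s + xs.length) ys := by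
  unfold pvIdxs
  rw [PySem.List.enumerate_append, List.filterMap_append]

theorem pvIdxs_nonalnum (s : Int) (xs : List Char) (h : ∀ x ∈ xs, pvQ x = true) :
    pvIdxs s xs = [] := by
  induction xs generalizing s with
  | nil => simp [pvIdxs]
  | cons c cs ih =>
    have hc : PySem.Chars.isalnum c = false := by
      have := h c List.mem_cons_self
      simpa [pvQ] using this
    unfold pvIdxs
    rw [PySem.List.enumerate_cons, List.filterMap_cons]
    simp only [hc, if_neg Bool.false_ne_true]
    exact ih (s + 1) (fun x hx => h x (List.mem_cons_of_mem _ hx))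

theorem pvIdxs_cons_alnum (s : Int) (c : Char) (xs : List Char) (h : pvQ c = false) :
    pvIdxs s (c :: xs) = s :: pvIdxs (s + 1) xs := by
  have hc : PySem.Chars.isalnum c = true := by simpa [pvQ] using h
  unfold pvIdxs
  rw [PySem.List.enumerate_cons, List.filterMap_cons]
  simp [hc]

-- every string with an alphanumeric char splits as u ++ b ++ w: non-alnum margins u, w and a
-- middle block b that starts and ends with an alphanumeric char
theorem pvDecomp (cs : List Char) (hnot : ¬ ∀ x ∈ cs, pvQ x = true) :
    ∃ (u b w : List Char), cs = u ++ b ++ w ∧ b ≠ [] ∧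
      (∀ x ∈ u, pvQ x = true) ∧ (∀ x ∈ w, pvQ x = true) ∧
      (∀ h : b ≠ [], pvQ (b.head h) = false ∧ pvQ (b.getLast h) = false) ∧
      cs.dropWhile pvQ = b ++ w := by
  have hane : cs.dropWhile pvQ ≠ [] := by
    simpa [List.dropWhile_eq_nil_iff] using hnot
  set a := cs.dropWhile pvQ with ha
  refine ⟨cs.takeWhile pvQ, a.rdropWhile pvQ, a.rtakeWhile pvQ, ?_, ?_, ?_, ?_, ?_, ?_⟩
  · rw [List.append_assoc, List.rdropWhile_append_rtakeWhile, ha,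
      List.takeWhile_append_dropWhile]
  · -- b ≠ []
    rw [Ne, List.rdropWhile_eq_nil_iff]
    intro h
    have hh := List.head_dropWhile_not pvQ hane
    have hm := h _ (List.head_mem hane)
    rw [hh] at hm
    exact Bool.false_ne_true hm
  · exact fun x hx => List.mem_takeWhile_imp hx
  · exact fun x hx => List.mem_rtakeWhile_imp hx
  · intro h
    constructor
    · obtain ⟨c, b1, hb⟩ := List.exists_cons_of_ne_nil h
      have hsplit : List.rdropWhile pvQ a ++ List.rtakeWhile pvQ a = a :=
        List.rdropWhile_append_rtakeWhile (p := pvQ) (l := a)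
      have h5 : a.head? = some c := by rw [← hsplit, hb]; simp
      have h6 : a.head? = some (a.head hane) := List.head?_eq_some_head hane
      have h7 : a.head hane = c := by rw [h5] at h6; exact (Option.some.inj h6).symm
      have h8 : (List.rdropWhile pvQ a).head h = c := by simp [hb]
      rw [h8, ← h7]
      exact List.head_dropWhile_not pvQ hane
    · have := List.rdropWhile_last_not pvQ a h
      simpa using this
  · exact ((List.rdropWhile_append_rtakeWhile (p := pvQ) (l := a))).symm

-- both ports return exactly the middle block b
theorem izloci_besedo_eq_alt (beseda : String) :
    izloci_besedo beseda = izloci_besedo_alt beseda := by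
  unfold izloci_besedo izloci_besedo_alt
  set cs := beseda.toList with hcs
  have hfront : pvScanFront cs cs ((0 : Nat) : Int) = cs.dropWhile pvQ :=
    pvScanFront_eq cs cs 0 (by simp)
  have hidxs : (PySem.List.enumerate cs).filterMap
      (fun ib => if PySem.Chars.isalnum ib.2 then some ib.1 else none) = pvIdxs 0 cs := rfl
  simp only [hidxs]
  by_cases hall : ∀ x ∈ cs, pvQ x = true
  · -- everything non-alphanumeric: both return ""
    have ha : cs.dropWhile pvQ = [] := List.dropWhile_eq_nil_iff.mpr hall
    have h0 : pvScanFront cs cs 0 = [] := by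
      simpa [ha] using hfront
    rw [if_pos (pvIdxs_nonalnum 0 cs hall)]
    rw [h0]
    simp [pvScanBack]
  · obtain ⟨u, b, w, hsplit, hbne, hu, hw, hends, hdw⟩ := pvDecomp cs hall
    obtain ⟨hhead, hlast⟩ := hends hbne
    -- ===== A-side: the scans return b =====
    have h0 : pvScanFront cs cs 0 = b ++ w := by
      simpa [hdw] using hfront
    have hback := pvScanBack_eq (b ++ w) (b ++ w).reverse 0 (by simp)
    have hrev : (b ++ w).reverse = w.reverse ++ b.reverse := by simp
    obtain ⟨c, b1, hb⟩ := List.exists_cons_of_ne_nil hbne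
    have hcond : ¬ ∀ x ∈ (b ++ w).reverse, pvQ x = true := by
      intro h
      have hc : c ∈ (b ++ w).reverse := by simp [hb]
      have := h c hc
      have hqc : pvQ c = false := by
        have : b.head hbne = c := by simp [hb]
        rw [← this]; exact hhead
      rw [hqc] at this; exact Bool.false_ne_true this
    -- the reversed takeWhile is exactly w.reverse
    have hbsplit : b.dropLast ++ [b.getLast hbne] = b := List.dropLast_append_getLast hbne
    have htw : ((b ++ w).reverse.takeWhile pvQ) = w.reverse := by
      rw [hrev]
      rw [List.takeWhile_append]
      have hwr : w.reverse.takeWhile pvQ = w.reverse :=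
        List.takeWhile_eq_self_iff.mpr (by intro x hx; exact hw x (List.mem_reverse.mp hx))
      rw [if_pos (by simp [hwr])]
      have hbr : b.reverse.takeWhile pvQ = [] := by
        conv_lhs => rw [← hbsplit]
        rw [List.reverse_append]
        simp only [List.reverse_singleton, List.singleton_append]
        exact List.takeWhile_cons_of_neg (by simp [hlast])
      rw [hbr, List.append_nil]
    have hback' : pvScanBack (b ++ w) (b ++ w).reverse 0 =
        if ∀ x ∈ (b ++ w).reverse, pvQ x = true then b ++ w
        else List.take ((b ++ w).length - (0 + (List.takeWhile pvQ (b ++ w).reverse).length)) (b ++ w) := by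
      simpa using hback
    have hA : pvScanBack (b ++ w) (b ++ w).reverse 0 = b := by
      rw [hback', if_neg hcond, htw]
      simp
    -- ===== B-side: idxs = pvIdxs ↑u.length b, first/last elements =====
    have hidxs_u : pvIdxs 0 cs = pvIdxs (u.length : Int) b := by
      rw [hsplit, List.append_assoc, pvIdxs_append, pvIdxs_nonalnum 0 u hu, List.nil_append,
        pvIdxs_append, pvIdxs_nonalnum _ w hw, List.append_nil, zero_add]
    have hconsform : pvIdxs (u.length : Int) b = (u.length : Int) :: pvIdxs ((u.length : Int) + 1) b1 := by
      rw [hb]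
      exact pvIdxs_cons_alnum _ c b1 (by
        have : b.head hbne = c := by simp [hb]
        rw [← this]; exact hhead)
    have happform : pvIdxs (u.length : Int) b =
        pvIdxs (u.length : Int) b.dropLast ++ [(u.length : Int) + b.dropLast.length] := by
      conv_lhs => rw [← hbsplit]
      rw [pvIdxs_append]
      congr 1
      rw [pvIdxs_cons_alnum _ _ _ hlast]
      rw [pvIdxs_nonalnum _ [] (by simp)]
    have hne_idxs : pvIdxs 0 cs ≠ [] := by
      rw [hidxs_u, hconsform]; exact List.cons_ne_nil _ _
    rw [if_neg hne_idxs]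
    have hfirst : PySem.List.pyGetD (pvIdxs 0 cs) 0 0 = (u.length : Int) := by
      rw [hidxs_u, hconsform]
      exact PySem.List.pyGetD_zero_cons ..
    have hlastidx : PySem.List.pyGetD (pvIdxs 0 cs) (-1) 0 = (u.length : Int) + b.dropLast.length := by
      rw [hidxs_u, happform]
      exact PySem.List.pyGetD_neg_one_append_singleton ..
    rw [hfirst, hlastidx, h0, hA]
    -- ===== the slice equals b =====
    have hb1 : 1 ≤ b.length := List.length_pos_of_ne_nil hbne
    have hdl : b.dropLast.length = b.length - 1 := List.length_dropLast
    have hstop : (u.length : Int) + (b.dropLast.length : Int) + 1 = ((u.length + b.length : Nat) : Int) := by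
      omega
    rw [hstop, PySem.List.slice_natCast]
    have hsub : u.length + b.length - u.length = b.length := by omega
    rw [hsub, hsplit, List.append_assoc, List.drop_left, List.take_left]

-- ===== VERDICT (by name: the statement is the Claim_ definition above) =====
theorem izloci_besedo_spec : Claim_equal_izloci_besedo := by
  intro beseda _
  unfold Spec_izloci_besedo
  exact izloci_besedo_eq_alt beseda
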